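-- pv_equiv track=rewrite | github.com/Casal0x/Helbreath-3.82 | Scripts/phase_e4_server_logging.py | convert_printf_to_stdformat
-- ===== SOURCE A (Python) =====
-- def convert_printf_to_stdformat(fmt):
--     """Convert a printf-style format string to std::format style.
--
--     Examples:
--         "Hello %s, count=%d"  → "Hello {}, count={}"
--         "Value: 0x%08X"       → "Value: 0x{:08X}"
--         "Ratio: %.2f%%"       → "Ratio: {:.2f}%"
--     """
--     result = []
--     i = 0
--     while i < len(fmt):
--         if fmt[i] == '{':
--             result.append('{{')
--             i += 1
--         elif fmt[i] == '}':
--             result.append('}}')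
--             i += 1
--         elif fmt[i] == '%':
--             if i + 1 < len(fmt) and fmt[i + 1] == '%':
--                 result.append('%')
--                 i += 2
--                 continue
--             # Parse printf format specifier
--             j = i + 1
--             # Flags: -, +, space, #, 0
--             while j < len(fmt) and fmt[j] in '-+ #0':
--                 j += 1
--             # Width (digits or *)
--             width_start = j
--             while j < len(fmt) and fmt[j].isdigit():
--                 j += 1
--             width = fmt[width_start:j]
--             # Precision
--             precision = ""
--             if j < len(fmt) and fmt[j] == '.':
--                 j += 1
--                 prec_start = j
--                 while j < len(fmt) and fmt[j].isdigit():
--                     j += 1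
--                 precision = fmt[prec_start:j]
--             # Length modifier (h, hh, l, ll, z, j, t, L, q)
--             while j < len(fmt) and fmt[j] in 'hlLzjtq':
--                 j += 1
--             # Type character
--             if j < len(fmt):
--                 type_char = fmt[j]
--                 j += 1
--
--                 # Check for leading-zero flag
--                 has_zero = '0' in fmt[i+1:width_start+1] if width_start > i+1 else False
--
--                 if type_char in ('d', 'i', 'u'):
--                     result.append('{}')
--                 elif type_char == 's':
--                     result.append('{}')
--                 elif type_char in ('X', 'x'):
--                     if width and (has_zero or '0' in fmt[i+1:j]):
--                         result.append('{:0' + width + type_char + '}')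
--                     elif width:
--                         result.append('{:' + width + type_char + '}')
--                     else:
--                         result.append('{:' + type_char + '}')
--                 elif type_char == 'f':
--                     if precision:
--                         result.append('{:.' + precision + 'f}')
--                     else:
--                         result.append('{}')
--                 elif type_char == 'c':
--                     result.append('{:c}')
--                 elif type_char == 'p':
--                     result.append('{}')
--                 else:
--                     # Unknown specifier, use generic
--                     result.append('{}')
--                 i = j
--             else:
--                 # Incomplete specifier at end
--                 result.append(fmt[i:])
--                 break
--         else:
--             result.append(fmt[i])
--             i += 1
--     return ''.join(result)
-- ===== SOURCE B (Python) =====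
-- import re
--
-- # One regex matches a whole printf specifier (or "%%"); literal text between
-- # matches is brace-escaped in bulk.  Possessive quantifiers (*+, ?+) forbid
-- # backtracking, matching a linear left-to-right scan; re.DOTALL lets "."
-- # take any character as the type char.
-- _SPEC = re.compile(r'%%|%[-+ #0]*+([0-9]*+)(?:\.([0-9]*+))?+[hlLzjtq]*+(.)', re.DOTALL)
--
--
-- def _lit(s):
--     return s.replace('{', '{{').replace('}', '}}')
--
--
-- def _conv(m):
--     if m.group(0) == '%%':
--         return '%'
--     width, prec, t = m.group(1), m.group(2), m.group(3)
--     if t in ('x', 'X'):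
--         if width and '0' in m.group(0)[1:]:
--             return '{:0' + width + t + '}'
--         if width:
--             return '{:' + width + t + '}'
--         return '{:' + t + '}'
--     if t == 'f' and prec:
--         return '{:.' + prec + 'f}'
--     if t == 'c':
--         return '{:c}'
--     return '{}'
--
--
-- def convert_printf_to_stdformat(fmt):
--     out = []
--     pos = 0
--     for m in _SPEC.finditer(fmt):
--         out.append(_lit(fmt[pos:m.start()]))
--         out.append(_conv(m))
--         pos = m.end()
--     tail = fmt[pos:]
--     cut = tail.find('%')   # an unmatched '%' starts an incomplete specifier at the end
--     if cut == -1: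
--         out.append(_lit(tail))
--     else:
--         out.append(_lit(tail[:cut]) + tail[cut:])
--     return ''.join(out)
-- ===== Notes on version B (the rewrite author's own statement) =====
-- stated objective: idiomatic
-- what changed: A's hand-written character-by-character while-loop scanner is replaced by a single compiled regex for a whole printf specifier (possessive quantifiers mirror the scanner's non-backtracking maximal munch), iterated with re.finditer, with literal gaps brace-escaped in bulk and the trailing incomplete specifier handled from the unmatched tail.
import Mathlib
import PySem

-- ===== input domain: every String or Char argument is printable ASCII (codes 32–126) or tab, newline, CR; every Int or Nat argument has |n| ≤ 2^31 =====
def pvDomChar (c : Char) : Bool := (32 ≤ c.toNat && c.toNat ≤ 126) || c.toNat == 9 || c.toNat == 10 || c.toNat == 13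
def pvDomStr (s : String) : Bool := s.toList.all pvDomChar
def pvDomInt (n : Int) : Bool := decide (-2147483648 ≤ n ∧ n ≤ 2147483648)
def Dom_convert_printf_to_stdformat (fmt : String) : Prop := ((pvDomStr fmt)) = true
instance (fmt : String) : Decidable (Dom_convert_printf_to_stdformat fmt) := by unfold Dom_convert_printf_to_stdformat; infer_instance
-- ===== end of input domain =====

-- B replaces A's hand-written while-loop scanner by a single regex for a whole printf
-- specifier (possessive quantifiers, matched with finditer), escaping literal gaps in bulk;
-- objective: idiomatic.  Return values only; neither program mutates its argument.

-- shared character-class tests ('c in "-+ #0"', 'c in "hlLzjtq"') and the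
-- "advance j while j < len and class(fmt[j])" index scan both Pythons perform
-- (fuel-guarded structural recursion; fuel = cs.length always suffices)
def pvIsFlag (c : Char) : Bool := c = '-' || c = '+' || c = ' ' || c = '#' || c = '0'
def pvIsLenMod (c : Char) : Bool := c = 'h' || c = 'l' || c = 'L' || c = 'z' || c = 'j' || c = 't' || c = 'q'

def pvScanGo (p : Char → Bool) (cs : List Char) : Nat → Nat → Nat
  | 0, j => j
  | fuel + 1, j =>
    if h : j < cs.length then
      if p cs[j] then pvScanGo p cs fuel (j + 1) else j
    else j

def pvScan (p : Char → Bool) (cs : List Char) (j : Nat) : Nat := pvScanGo p cs cs.length j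

-- the scan positions of one specifier starting with '%' at i (Python's j after each
-- stage), and the captured width / precision substrings, shared by both parsers
def pvJ1 (cs : List Char) (i : Nat) : Nat := pvScan pvIsFlag cs (i + 1)           -- after flags
def pvJ2 (cs : List Char) (i : Nat) : Nat := pvScan PySem.Chars.isdigit cs (pvJ1 cs i)  -- after width
def pvJ3 (cs : List Char) (i : Nat) : Nat :=                                       -- after '.' + precision
  if cs[pvJ2 cs i]? = some '.' then pvScan PySem.Chars.isdigit cs (pvJ2 cs i + 1) else pvJ2 cs i
def pvJ4 (cs : List Char) (i : Nat) : Nat := pvScan pvIsLenMod cs (pvJ3 cs i)     -- after length modifiers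
def pvWidth (cs : List Char) (i : Nat) : List Char :=                              -- fmt[width_start:j]
  (cs.drop (pvJ1 cs i)).take (pvJ2 cs i - pvJ1 cs i)
def pvPrecA (cs : List Char) (i : Nat) : List Char :=                              -- A's precision ('' if no '.')
  if cs[pvJ2 cs i]? = some '.' then (cs.drop (pvJ2 cs i + 1)).take (pvJ3 cs i - (pvJ2 cs i + 1)) else []
def pvPrecB (cs : List Char) (i : Nat) : Option (List Char) :=                     -- B's group 2 (None if no '.')
  if cs[pvJ2 cs i]? = some '.' then some ((cs.drop (pvJ2 cs i + 1)).take (pvJ3 cs i - (pvJ2 cs i + 1))) else none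

-- ===== PORT A =====
-- A's while-loop: index i over fmt, slices fmt[a:b] (nonnegative, clamped) ported as drop/take;
-- the result list + ''.join ported as returning the emitted pieces in order;
-- fuel cs.length + 1 strictly exceeds the number of iterations (i advances every round).
def pvLoopAGo (cs : List Char) : Nat → Nat → List Char
  | 0, _ => []
  | fuel + 1, i =>
    if h : i < cs.length then
      let c := cs[i]
      if c = '{' then '{' :: '{' :: pvLoopAGo cs fuel (i + 1)
      else if c = '}' then '}' :: '}' :: pvLoopAGo cs fuel (i + 1)
      else if c = '%' then
        if cs[i+1]? = some '%' then '%' :: pvLoopAGo cs fuel (i + 2)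
        else
          if h4 : pvJ4 cs i < cs.length then
            let t := cs[pvJ4 cs i]
            let hasZero : Bool :=
              if i + 1 < pvJ1 cs i then decide ('0' ∈ (cs.drop (i + 1)).take (pvJ1 cs i + 1 - (i + 1))) else false
            let piece : List Char :=
              if t = 'd' ∨ t = 'i' ∨ t = 'u' then ['{', '}']
              else if t = 's' then ['{', '}']
              else if t = 'X' ∨ t = 'x' then
                if pvWidth cs i ≠ [] ∧ (hasZero = true ∨ '0' ∈ (cs.drop (i + 1)).take (pvJ4 cs i + 1 - (i + 1))) then
                  '{' :: ':' :: '0' :: (pvWidth cs i ++ [t, '}'])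
                else if pvWidth cs i ≠ [] then '{' :: ':' :: (pvWidth cs i ++ [t, '}'])
                else ['{', ':', t, '}']
              else if t = 'f' then
                if pvPrecA cs i ≠ [] then '{' :: ':' :: '.' :: (pvPrecA cs i ++ ['f', '}'])
                else ['{', '}']
              else if t = 'c' then ['{', ':', 'c', '}']
              else if t = 'p' then ['{', '}']
              else ['{', '}']
            piece ++ pvLoopAGo cs fuel (pvJ4 cs i + 1)
          else cs.drop i                                             -- incomplete specifier at end
      else c :: pvLoopAGo cs fuel (i + 1)
    else []

def pvLoopA (cs : List Char) (i : Nat) : List Char := pvLoopAGo cs (cs.length + 1) i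

def convert_printf_to_stdformat (fmt : String) : String :=
  String.ofList (pvLoopA fmt.toList 0)

-- ===== PORT B =====
-- Source B: _SPEC = re.compile(r'%%|%[-+ #0]*+([0-9]*+)(?:\.([0-9]*+))?+[hlLzjtq]*+(.)', re.DOTALL),
-- applied with finditer; the regex has no Lean counterpart, so the (deterministic, possessive =
-- non-backtracking) pattern is ported by hand: pvMatchAt attempts the pattern at one position
-- (exact: each possessive class star is a maximal scan, '(.)' with DOTALL takes any next char),
-- pvFindFrom is finditer's left-to-right search for the next match (fuel-guarded, fuel = cs.length).
inductive PvMatch where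
  | pp (s e : Nat)                                                          -- the '%%' alternative
  | spec (s e : Nat) (g0 width : List Char) (prec : Option (List Char)) (t : Char)
deriving DecidableEq

def PvMatch.start : PvMatch → Nat
  | .pp s _ => s
  | .spec s _ _ _ _ _ => s

def PvMatch.stop : PvMatch → Nat
  | .pp _ e => e
  | .spec _ e _ _ _ _ => e

def pvMatchAt (cs : List Char) (p : Nat) : Option PvMatch :=
  if cs[p]? = some '%' then
    if cs[p+1]? = some '%' then some (.pp p (p + 2))
    else
      match cs[pvJ4 cs p]? with
      | some t => some (.spec p (pvJ4 cs p + 1) ((cs.drop p).take (pvJ4 cs p + 1 - p))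
                         (pvWidth cs p) (pvPrecB cs p) t)
      | none => none                                                        -- '(.)' has no char: no match here
  else none

def pvFindFromGo (cs : List Char) : Nat → Nat → Option PvMatch
  | 0, _ => none
  | fuel + 1, p =>
    if _h : p < cs.length then
      match pvMatchAt cs p with
      | some m => some m
      | none => pvFindFromGo cs fuel (p + 1)
    else none

def pvFindFrom (cs : List Char) (p : Nat) : Option PvMatch := pvFindFromGo cs cs.length p

-- literal text between matches: s.replace('{','{{').replace('}','}}')
def pvLit (s : List Char) : List Char :=
  PySem.Chars.replace (PySem.Chars.replace s ['{'] ['{', '{']) ['}'] ['}', '}']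

-- _conv(m): the replacement for one specifier match
def pvConv (m : PvMatch) : List Char :=
  match m with
  | .pp _ _ => ['%']
  | .spec _ _ g0 width prec t =>
    if t = 'x' ∨ t = 'X' then
      if width ≠ [] ∧ '0' ∈ g0.drop 1 then '{' :: ':' :: '0' :: (width ++ [t, '}'])
      else if width ≠ [] then '{' :: ':' :: (width ++ [t, '}'])
      else ['{', ':', t, '}']
    else if t = 'f' ∧ prec.getD [] ≠ [] then                                -- 'prec' truthy: present and non-empty
      '{' :: ':' :: '.' :: (prec.getD [] ++ ['f', '}'])
    else if t = 'c' then ['{', ':', 'c', '}']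
    else ['{', '}']

-- the finditer loop (pos = end of the previous match), then the tail:
-- tail.find('%') ported as findIdx? (exact for a one-char needle: first index or none/-1);
-- fuel cs.length + 1 strictly exceeds the number of matches (pos advances past each match).
def pvLoopBGo (cs : List Char) : Nat → Nat → List Char
  | 0, _ => []
  | fuel + 1, pos =>
    match pvFindFrom cs pos with
    | some m => pvLit ((cs.drop pos).take (m.start - pos)) ++ pvConv m ++ pvLoopBGo cs fuel m.stop
    | none =>
      let tail := cs.drop pos
      match tail.findIdx? (· = '%') with
      | none => pvLit tail
      | some cut => pvLit (tail.take cut) ++ tail.drop cut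

def pvLoopB (cs : List Char) (pos : Nat) : List Char := pvLoopBGo cs (cs.length + 1) pos

def convert_printf_to_stdformat_alt (fmt : String) : String :=
  String.ofList (pvLoopB fmt.toList 0)

-- ===== PRECONDITION & SPEC =====
def Spec_convert_printf_to_stdformat (fmt : String) (out : String) : Prop := out = convert_printf_to_stdformat_alt fmt
instance (fmt : String) (out : String) : Decidable (Spec_convert_printf_to_stdformat fmt out) := by unfold Spec_convert_printf_to_stdformat; infer_instance

-- ===== CLAIM (what is proved, stated in full; the proofs are below) =====
def Claim_equal_convert_printf_to_stdformat : Prop := ∀ (fmt : String), Dom_convert_printf_to_stdformat fmt → Spec_convert_printf_to_stdformat fmt (convert_printf_to_stdformat fmt)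

-- ===== LEMMAS AND PROOFS =====

-- per-character expansion of the literal escaping
def pvEsc (c : Char) : List Char :=
  if c = '{' then ['{', '{'] else if c = '}' then ['}', '}'] else [c]

theorem pvReplaceGo_single (o : Char) (n : List Char) :
    ∀ (fuel : Nat) (s acc : List Char), s.length ≤ fuel →
    PySem.Chars.replace.go [o] n fuel s acc
      = acc.reverse ++ s.flatMap (fun c => if c = o then n else [c]) := by
  intro fuel
  induction fuel with
  | zero => intro s acc h; cases s with
    | nil => simp [PySem.Chars.replace.go]
    | cons c t => simp at h
  | succ f ih =>
    intro s acc h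
    cases s with
    | nil => simp [PySem.Chars.replace.go]
    | cons c t =>
      rw [PySem.Chars.replace.go]
      by_cases hc : c = o
      · have hp : List.isPrefixOf [o] (c :: t) = true := by simp [List.isPrefixOf, hc]
        rw [if_pos hp]
        simp only [List.length_cons] at h
        rw [ih _ _ (by simpa using Nat.le_of_succ_le_succ h)]
        simp [hc]
      · have hp : List.isPrefixOf [o] (c :: t) = false := by
          simp [List.isPrefixOf]; exact fun hh => (hc hh.symm)
        rw [if_neg (by simp [hp])]
        simp only [List.length_cons] at h
        rw [ih _ _ (by omega)]
        simp [hc]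

theorem pvReplace_single (o : Char) (n : List Char) (s : List Char) :
    PySem.Chars.replace s [o] n = s.flatMap (fun c => if c = o then n else [c]) := by
  rw [PySem.Chars.replace]
  simp only [List.isEmpty_cons]
  exact pvReplaceGo_single o n s.length s [] (le_refl _)

theorem pvLit_flatMap (s : List Char) : pvLit s = s.flatMap pvEsc := by
  rw [pvLit, pvReplace_single, pvReplace_single]
  induction s with
  | nil => simp
  | cons c t ih =>
    simp only [List.flatMap_cons, List.flatMap_append, ih]
    congr 1
    by_cases h1 : c = '{'
    · simp [h1, pvEsc]
    · by_cases h2 : c = '}' <;> simp [h1, h2, pvEsc]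

theorem pvLit_nil : pvLit [] = [] := by simp [pvLit_flatMap]

theorem pvLit_cons (c : Char) (l : List Char) : pvLit (c :: l) = pvEsc c ++ pvLit l := by
  simp [pvLit_flatMap]

theorem pvScanGo_ge (p : Char → Bool) (cs : List Char) :
    ∀ (fuel j : Nat), j ≤ pvScanGo p cs fuel j := by
  intro fuel
  induction fuel with
  | zero => intro j; exact le_refl _
  | succ f ih =>
    intro j
    rw [pvScanGo]
    split
    · split
      · have := ih (j + 1); omega
      · exact le_refl _
    · exact le_refl _

theorem pvScan_ge (p : Char → Bool) (cs : List Char) (j : Nat) : j ≤ pvScan p cs j :=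
  pvScanGo_ge p cs cs.length j

theorem pvScanGo_class (p : Char → Bool) (cs : List Char) :
    ∀ (fuel j k : Nat), j ≤ k → k < pvScanGo p cs fuel j → (hk : k < cs.length) →
      p cs[k] = true := by
  intro fuel
  induction fuel with
  | zero => intro j k h1 h2 hk; rw [pvScanGo] at h2; omega
  | succ f ih =>
    intro j k h1 h2 hk
    rw [pvScanGo] at h2
    split at h2
    · split at h2
      · rcases Nat.eq_or_lt_of_le h1 with he | hlt
        · subst he; assumption
        · exact ih (j + 1) k hlt h2 hk
      · omega
    · omega

theorem pvScan_class (p : Char → Bool) (cs : List Char) (j k : Nat)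
    (h1 : j ≤ k) (h2 : k < pvScan p cs j) (hk : k < cs.length) : p cs[k] = true :=
  pvScanGo_class p cs cs.length j k h1 h2 hk

theorem pvJ_chain (cs : List Char) (i : Nat) :
    i + 1 ≤ pvJ1 cs i ∧ pvJ1 cs i ≤ pvJ2 cs i ∧ pvJ2 cs i ≤ pvJ3 cs i ∧ pvJ3 cs i ≤ pvJ4 cs i := by
  refine ⟨pvScan_ge _ _ _, pvScan_ge _ _ _, ?_, pvScan_ge _ _ _⟩
  unfold pvJ3
  split
  · have := pvScan_ge PySem.Chars.isdigit cs (pvJ2 cs i + 1); omega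
  · exact le_refl _

theorem pvMem_take_mono {a : Char} {l : List Char} {m n : Nat} (hmn : m ≤ n)
    (h : a ∈ l.take m) : a ∈ l.take n := by
  have : l.take m = (l.take n).take m := by rw [List.take_take, Nat.min_eq_left hmn]
  rw [this] at h
  exact List.mem_of_mem_take h

theorem pvMatchAt_stop_gt (cs : List Char) (p : Nat) (m : PvMatch)
    (h : pvMatchAt cs p = some m) : p < m.stop ∧ m.start = p := by
  unfold pvMatchAt at h
  split at h
  · split at h
    · cases h; refine ⟨?_, rfl⟩; simp [PvMatch.stop]
    · split at h
      · cases h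
        refine ⟨?_, rfl⟩
        simp only [PvMatch.stop]
        have := pvJ_chain cs p
        omega
      · cases h
  · cases h

theorem pvMatchAt_none_of_ne (cs : List Char) (p : Nat) (h : cs[p]? ≠ some '%') :
    pvMatchAt cs p = none := by
  unfold pvMatchAt; simp [h]

theorem pvFindFromGo_ge (cs : List Char) :
    ∀ (fuel p : Nat), cs.length ≤ p → pvFindFromGo cs fuel p = none := by
  intro fuel p h
  cases fuel with
  | zero => rfl
  | succ f => rw [pvFindFromGo, dif_neg (by omega)]

theorem pvFindFromGo_irrel (cs : List Char) :
    ∀ (f1 f2 p : Nat), cs.length ≤ p + f1 → cs.length ≤ p + f2 →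
      pvFindFromGo cs f1 p = pvFindFromGo cs f2 p := by
  intro f1
  induction f1 with
  | zero =>
    intro f2 p h1 h2
    rw [pvFindFromGo_ge cs 0 p (by omega), pvFindFromGo_ge cs f2 p (by omega)]
  | succ f1 ih =>
    intro f2 p h1 h2
    by_cases hp : p < cs.length
    · cases f2 with
      | zero => omega
      | succ f2 =>
        rw [pvFindFromGo, pvFindFromGo, dif_pos hp, dif_pos hp]
        cases hm : pvMatchAt cs p with
        | some m => simp [hm]
        | none => simp only [hm]; exact ih f2 (p + 1) (by omega) (by omega)
    · rw [pvFindFromGo_ge cs _ p (by omega), pvFindFromGo_ge cs f2 p (by omega)]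

theorem pvFindFrom_ge (cs : List Char) (p : Nat) (h : cs.length ≤ p) :
    pvFindFrom cs p = none := pvFindFromGo_ge cs cs.length p h

theorem pvFindFrom_unfold (cs : List Char) (p : Nat) (hp : p < cs.length) :
    pvFindFrom cs p = (match pvMatchAt cs p with
      | some m => some m
      | none => pvFindFrom cs (p + 1)) := by
  cases hL : cs.length with
  | zero => omega
  | succ k =>
    show pvFindFromGo cs cs.length p = _
    rw [hL, pvFindFromGo, dif_pos (by omega)]
    cases hm : pvMatchAt cs p with
    | some m => simp [hm]
    | none =>
      simp only [hm]
      show pvFindFromGo cs k (p + 1) = pvFindFrom cs (p + 1)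
      rw [show pvFindFrom cs (p + 1) = pvFindFromGo cs cs.length (p + 1) from rfl]
      exact pvFindFromGo_irrel cs k cs.length (p + 1) (by omega) (by omega)

theorem pvFindFrom_step (cs : List Char) (p : Nat) (h : p < cs.length)
    (hm : pvMatchAt cs p = none) : pvFindFrom cs p = pvFindFrom cs (p + 1) := by
  rw [pvFindFrom_unfold cs p h, hm]

theorem pvFindFrom_bounds (cs : List Char) (p : Nat) (m : PvMatch)
    (h : pvFindFrom cs p = some m) : p ≤ m.start ∧ m.start < m.stop ∧ p < cs.length := by
  by_cases hp : p < cs.length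
  · rw [pvFindFrom_unfold cs p hp] at h
    cases hm : pvMatchAt cs p with
    | some m' =>
        rw [hm] at h; cases h
        have := pvMatchAt_stop_gt cs p m hm
        omega
    | none =>
        rw [hm] at h
        have := pvFindFrom_bounds cs (p + 1) m h
        omega
  · rw [pvFindFrom_ge cs p (by omega)] at h; cases h
termination_by cs.length - p

theorem pvFindFrom_none (cs : List Char) (q : Nat)
    (h : ∀ k, q ≤ k → (hk : k < cs.length) → cs[k] ≠ '%') : pvFindFrom cs q = none := by
  by_cases hq : q < cs.length
  · rw [pvFindFrom_step cs q hq, pvFindFrom_none cs (q + 1) (fun k hk1 hk2 => h k (by omega) hk2)]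
    apply pvMatchAt_none_of_ne
    intro hc
    rw [List.getElem?_eq_getElem hq] at hc
    exact h q (le_refl q) hq (by simpa using hc)
  · exact pvFindFrom_ge cs q (by omega)
termination_by cs.length - q

theorem pvLoopAGo_ge (cs : List Char) :
    ∀ (fuel i : Nat), cs.length ≤ i → pvLoopAGo cs fuel i = [] := by
  intro fuel i h
  cases fuel with
  | zero => rfl
  | succ f => rw [pvLoopAGo, dif_neg (by omega)]

theorem pvLoopAGo_irrel (cs : List Char) :
    ∀ (f1 f2 i : Nat), cs.length < i + f1 → cs.length < i + f2 →
      pvLoopAGo cs f1 i = pvLoopAGo cs f2 i := by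
  intro f1
  induction f1 with
  | zero =>
    intro f2 i h1 h2
    rw [pvLoopAGo_ge cs 0 i (by omega), pvLoopAGo_ge cs f2 i (by omega)]
  | succ f1 ih =>
    intro f2 i h1 h2
    by_cases hi : i < cs.length
    · cases f2 with
      | zero => omega
      | succ f2 =>
        rw [pvLoopAGo, pvLoopAGo, dif_pos hi, dif_pos hi]
        have := pvJ_chain cs i
        have e1 : pvLoopAGo cs f1 (i + 1) = pvLoopAGo cs f2 (i + 1) := ih f2 (i + 1) (by omega) (by omega)
        have e2 : pvLoopAGo cs f1 (i + 2) = pvLoopAGo cs f2 (i + 2) := ih f2 (i + 2) (by omega) (by omega)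
        have e3 : pvLoopAGo cs f1 (pvJ4 cs i + 1) = pvLoopAGo cs f2 (pvJ4 cs i + 1) :=
          ih f2 (pvJ4 cs i + 1) (by omega) (by omega)
        simp only [e1, e2, e3]
    · rw [pvLoopAGo_ge cs _ i (by omega), pvLoopAGo_ge cs f2 i (by omega)]

theorem pvLoopAGo_len (cs : List Char) (x : Nat) (hx : 1 ≤ x) :
    pvLoopAGo cs cs.length x = pvLoopA cs x :=
  pvLoopAGo_irrel cs cs.length (cs.length + 1) x (by omega) (by omega)

theorem pvLoopBGo_ge (cs : List Char) :
    ∀ (fuel pos : Nat), cs.length ≤ pos → pvLoopBGo cs fuel pos = [] := by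
  intro fuel pos h
  cases fuel with
  | zero => rfl
  | succ f =>
    rw [pvLoopBGo]
    rw [pvFindFrom_ge cs pos h]
    rw [List.drop_eq_nil_of_le h]
    simp [pvLit_flatMap]

theorem pvLoopBGo_irrel (cs : List Char) :
    ∀ (f1 f2 pos : Nat), cs.length < pos + f1 → cs.length < pos + f2 →
      pvLoopBGo cs f1 pos = pvLoopBGo cs f2 pos := by
  intro f1
  induction f1 with
  | zero =>
    intro f2 pos h1 h2
    rw [pvLoopBGo_ge cs 0 pos (by omega), pvLoopBGo_ge cs f2 pos (by omega)]
  | succ f1 ih =>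
    intro f2 pos h1 h2
    by_cases hpos : pos < cs.length
    · cases f2 with
      | zero => omega
      | succ f2 =>
        rw [pvLoopBGo, pvLoopBGo]
        cases hf : pvFindFrom cs pos with
        | some m =>
          have hb := pvFindFrom_bounds cs pos m hf
          have e3 : pvLoopBGo cs f1 m.stop = pvLoopBGo cs f2 m.stop :=
            ih f2 m.stop (by omega) (by omega)
          simp only [hf, e3]
        | none => simp only [hf]
    · rw [pvLoopBGo_ge cs _ pos (by omega), pvLoopBGo_ge cs f2 pos (by omega)]

theorem pvLoopBGo_len (cs : List Char) (x : Nat) (hx : 1 ≤ x) :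
    pvLoopBGo cs cs.length x = pvLoopB cs x :=
  pvLoopBGo_irrel cs cs.length (cs.length + 1) x (by omega) (by omega)

theorem pvLoopA_ge (cs : List Char) (i : Nat) (hi : cs.length ≤ i) : pvLoopA cs i = [] :=
  pvLoopAGo_ge cs (cs.length + 1) i hi

theorem pvLoopB_ge (cs : List Char) (i : Nat) (hi : cs.length ≤ i) : pvLoopB cs i = [] :=
  pvLoopBGo_ge cs (cs.length + 1) i hi

-- one literal (non-'%') character: B copies it through the escaper
theorem pvLoopB_literal (cs : List Char) (pos : Nat) (hlt : pos < cs.length)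
    (hne : cs[pos] ≠ '%') : pvLoopB cs pos = pvEsc cs[pos] ++ pvLoopB cs (pos + 1) := by
  have hmz : pvMatchAt cs pos = none := by
    apply pvMatchAt_none_of_ne
    rw [List.getElem?_eq_getElem hlt]
    simp [hne]
  have hstep : pvFindFrom cs pos = pvFindFrom cs (pos + 1) := pvFindFrom_step cs pos hlt hmz
  have hcons : cs.drop pos = cs[pos] :: cs.drop (pos + 1) := (List.getElem_cons_drop hlt).symm
  rw [pvLoopB, pvLoopB, pvLoopBGo, pvLoopBGo]
  rw [hstep]
  cases hf : pvFindFrom cs (pos + 1) with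
  | some m =>
    have hb := pvFindFrom_bounds cs (pos + 1) m hf
    simp only [hf]
    rw [hcons, List.take_cons (by omega), pvLit_cons]
    have he : m.start - pos - 1 = m.start - (pos + 1) := by omega
    simp [he]
  | none =>
    simp only [hf]
    rw [hcons, List.findIdx?_cons]
    have hd : decide (cs[pos] = '%') = false := by simp [hne]
    rw [hd]
    simp only [Bool.false_eq_true, if_false]
    cases hi : (cs.drop (pos + 1)).findIdx? (· = '%') with
    | none =>
      simp [pvLit_flatMap]
      rw [hcons, List.flatMap_cons]
    | some cut =>
      simp only [Option.map_some]
      rw [List.take_succ_cons, pvLit_cons, List.drop_succ_cons, List.append_assoc]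

-- A's emitted piece for a complete specifier, as one expression
def pvPiece (cs : List Char) (i : Nat) (h4 : pvJ4 cs i < cs.length) : List Char :=
  let t := cs[pvJ4 cs i]
  let hasZero : Bool :=
    if i + 1 < pvJ1 cs i then decide ('0' ∈ (cs.drop (i + 1)).take (pvJ1 cs i + 1 - (i + 1))) else false
  if t = 'd' ∨ t = 'i' ∨ t = 'u' then ['{', '}']
  else if t = 's' then ['{', '}']
  else if t = 'X' ∨ t = 'x' then
    if pvWidth cs i ≠ [] ∧ (hasZero = true ∨ '0' ∈ (cs.drop (i + 1)).take (pvJ4 cs i + 1 - (i + 1))) then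
      '{' :: ':' :: '0' :: (pvWidth cs i ++ [t, '}'])
    else if pvWidth cs i ≠ [] then '{' :: ':' :: (pvWidth cs i ++ [t, '}'])
    else ['{', ':', t, '}']
  else if t = 'f' then
    if pvPrecA cs i ≠ [] then '{' :: ':' :: '.' :: (pvPrecA cs i ++ ['f', '}'])
    else ['{', '}']
  else if t = 'c' then ['{', ':', 'c', '}']
  else if t = 'p' then ['{', '}']
  else ['{', '}']

theorem pvLoopA_eq_spec (cs : List Char) (i : Nat) (hi : i < cs.length) (hc : cs[i] = '%')
    (hpp : ¬ cs[i+1]? = some '%') (h4 : pvJ4 cs i < cs.length) :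
    pvLoopA cs i = pvPiece cs i h4 ++ pvLoopA cs (pvJ4 cs i + 1) := by
  have := pvJ_chain cs i
  rw [pvLoopA, pvLoopAGo, dif_pos hi, pvLoopAGo_len cs (i + 1) (by omega),
    pvLoopAGo_len cs (i + 2) (by omega), pvLoopAGo_len cs (pvJ4 cs i + 1) (by omega)]
  simp only [hc, if_true]
  try rw [if_neg (by decide : ¬('%' = '{')), if_neg (by decide : ¬('%' = '}'))]
  rw [if_neg hpp, dif_pos h4]
  rfl

theorem pvLoopA_eq_incomplete (cs : List Char) (i : Nat) (hi : i < cs.length) (hc : cs[i] = '%')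
    (hpp : ¬ cs[i+1]? = some '%') (h4 : ¬ pvJ4 cs i < cs.length) :
    pvLoopA cs i = cs.drop i := by
  have := pvJ_chain cs i
  rw [pvLoopA, pvLoopAGo, dif_pos hi, pvLoopAGo_len cs (i + 1) (by omega),
    pvLoopAGo_len cs (i + 2) (by omega), pvLoopAGo_len cs (pvJ4 cs i + 1) (by omega)]
  simp only [hc, if_true]
  try rw [if_neg (by decide : ¬('%' = '{')), if_neg (by decide : ¬('%' = '}'))]
  rw [if_neg hpp, dif_neg h4]

theorem pvMatchAt_eq_spec (cs : List Char) (i : Nat) (hi : i < cs.length) (hc : cs[i] = '%')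
    (hpp : ¬ cs[i+1]? = some '%') (h4 : pvJ4 cs i < cs.length) :
    pvMatchAt cs i = some (.spec i (pvJ4 cs i + 1) ((cs.drop i).take (pvJ4 cs i + 1 - i))
      (pvWidth cs i) (pvPrecB cs i) cs[pvJ4 cs i]) := by
  unfold pvMatchAt
  rw [List.getElem?_eq_getElem hi, hc, if_pos rfl, if_neg hpp]
  split
  · rename_i t ht
    have ht' : some t = some (cs[pvJ4 cs i]'h4) := by
      rw [← ht]; exact List.getElem?_eq_getElem h4
    rw [Option.some.injEq] at ht'
    subst ht'
    rfl
  · rename_i ht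
    have ht2 : cs[pvJ4 cs i]? = none := ht
    rw [List.getElem?_eq_none_iff] at ht2
    omega

theorem pvMatchAt_eq_incomplete (cs : List Char) (i : Nat) (hc : cs[i]? = some '%')
    (hpp : ¬ cs[i+1]? = some '%') (h4 : ¬ pvJ4 cs i < cs.length) :
    pvMatchAt cs i = none := by
  unfold pvMatchAt
  rw [hc, if_pos rfl, if_neg hpp]
  split
  · rename_i t ht
    have ht' : cs[pvJ4 cs i]? = some t := ht
    rw [List.getElem?_eq_some_iff] at ht'
    obtain ⟨hlt, -⟩ := ht'
    omega
  · rfl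

-- incomplete specifier at the end: everything after the '%' is a flag/digit/dot/length character
theorem pvNoPct (cs : List Char) (i : Nat) (h4 : ¬ pvJ4 cs i < cs.length) :
    ∀ k, i + 1 ≤ k → (hk : k < cs.length) → cs[k] ≠ '%' := by
  intro k hk1 hk2 hkp
  obtain ⟨c1, c2, c3, c4⟩ := pvJ_chain cs i
  rcases Nat.lt_or_ge k (pvJ1 cs i) with h | h
  · have := pvScan_class pvIsFlag cs (i + 1) k hk1 h hk2
    rw [hkp] at this; exact absurd this (by decide)
  rcases Nat.lt_or_ge k (pvJ2 cs i) with h2 | h2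
  · have := pvScan_class PySem.Chars.isdigit cs (pvJ1 cs i) k h h2 hk2
    rw [hkp] at this; exact absurd this (by decide)
  by_cases hdot : cs[pvJ2 cs i]? = some '.'
  · rcases Nat.eq_or_lt_of_le h2 with he | hgt
    · rw [he] at hdot
      rw [List.getElem?_eq_getElem hk2, hkp] at hdot
      exact absurd (Option.some.inj hdot) (by decide)
    · rcases Nat.lt_or_ge k (pvJ3 cs i) with h3 | h3
      · have hj3 : pvJ3 cs i = pvScan PySem.Chars.isdigit cs (pvJ2 cs i + 1) := by
          unfold pvJ3; rw [if_pos hdot]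
        rw [hj3] at h3
        have := pvScan_class PySem.Chars.isdigit cs (pvJ2 cs i + 1) k (by omega) h3 hk2
        rw [hkp] at this; exact absurd this (by decide)
      · have := pvScan_class pvIsLenMod cs (pvJ3 cs i) k h3 (by unfold pvJ4 at h4; omega) hk2
        rw [hkp] at this; exact absurd this (by decide)
  · have hj3 : pvJ3 cs i = pvJ2 cs i := by unfold pvJ3; rw [if_neg hdot]
    have := pvScan_class pvIsLenMod cs (pvJ3 cs i) k (by omega) (by unfold pvJ4 at h4; omega) hk2
    rw [hkp] at this; exact absurd this (by decide)

theorem pvPiece_eq_conv (cs : List Char) (i : Nat) (h4 : pvJ4 cs i < cs.length) :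
    pvPiece cs i h4 = pvConv (.spec i (pvJ4 cs i + 1) ((cs.drop i).take (pvJ4 cs i + 1 - i))
      (pvWidth cs i) (pvPrecB cs i) cs[pvJ4 cs i]) := by
  obtain ⟨c1, c2, c3, c4⟩ := pvJ_chain cs i
  simp only [pvPiece, pvConv]
  -- group0[1:] is exactly A's fmt[i+1:j]
  have hg0 : (((cs.drop i).take (pvJ4 cs i + 1 - i)).drop 1)
      = (cs.drop (i + 1)).take (pvJ4 cs i + 1 - (i + 1)) := by
    rw [List.drop_take, List.drop_drop]
    congr 1
  -- A's has_zero implies '0' somewhere in the whole specifier body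
  have hzimp : (if i + 1 < pvJ1 cs i then
        decide ('0' ∈ (cs.drop (i + 1)).take (pvJ1 cs i + 1 - (i + 1))) else false) = true →
      '0' ∈ (cs.drop (i + 1)).take (pvJ4 cs i + 1 - (i + 1)) := by
    intro h
    split at h
    · exact pvMem_take_mono (by omega) (of_decide_eq_true h)
    · cases h
  have hpr : (pvPrecB cs i).getD [] = pvPrecA cs i := by
    unfold pvPrecA pvPrecB; split <;> simp
  rw [hg0, hpr]
  by_cases hx : cs[pvJ4 cs i] = 'X' ∨ cs[pvJ4 cs i] = 'x'
  · have hd : ¬(cs[pvJ4 cs i] = 'd' ∨ cs[pvJ4 cs i] = 'i' ∨ cs[pvJ4 cs i] = 'u') := by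
      rcases hx with h | h <;> simp [h]
    have hs : ¬(cs[pvJ4 cs i] = 's') := by rcases hx with h | h <;> simp [h]
    rw [if_neg hd, if_neg hs, if_pos hx, if_pos (hx.symm : cs[pvJ4 cs i] = 'x' ∨ _)]
    have hiff : (pvWidth cs i ≠ [] ∧ ((if i + 1 < pvJ1 cs i then
          decide ('0' ∈ (cs.drop (i + 1)).take (pvJ1 cs i + 1 - (i + 1))) else false) = true ∨
          '0' ∈ (cs.drop (i + 1)).take (pvJ4 cs i + 1 - (i + 1)))) ↔
        (pvWidth cs i ≠ [] ∧ '0' ∈ (cs.drop (i + 1)).take (pvJ4 cs i + 1 - (i + 1))) := by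
      constructor
      · rintro ⟨w, hor⟩; exact ⟨w, hor.elim hzimp id⟩
      · rintro ⟨w, hm⟩; exact ⟨w, Or.inr hm⟩
    exact if_congr hiff rfl rfl
  · have hbx : ¬(cs[pvJ4 cs i] = 'x' ∨ cs[pvJ4 cs i] = 'X') := fun h => hx h.symm
    rw [if_neg hbx]
    by_cases hf : cs[pvJ4 cs i] = 'f'
    · have hd : ¬(cs[pvJ4 cs i] = 'd' ∨ cs[pvJ4 cs i] = 'i' ∨ cs[pvJ4 cs i] = 'u') := by simp [hf]
      have hs : ¬(cs[pvJ4 cs i] = 's') := by simp [hf]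
      rw [if_neg hd, if_neg hs, if_neg hx, if_pos hf]
      have hc : ¬(cs[pvJ4 cs i] = 'c') := by simp [hf]
      by_cases hprec : pvPrecA cs i ≠ []
      · rw [if_pos hprec, if_pos ⟨hf, hprec⟩]
      · rw [if_neg hprec, if_neg (fun h => hprec h.2), if_neg hc]
    · have hnf : ¬(cs[pvJ4 cs i] = 'f' ∧ (pvPrecA cs i) ≠ []) := fun h => hf h.1
      rw [if_neg hnf]
      by_cases hcc : cs[pvJ4 cs i] = 'c'
      · have hd : ¬(cs[pvJ4 cs i] = 'd' ∨ cs[pvJ4 cs i] = 'i' ∨ cs[pvJ4 cs i] = 'u') := by simp [hcc]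
        have hs : ¬(cs[pvJ4 cs i] = 's') := by simp [hcc]
        rw [if_neg hd, if_neg hs, if_neg hx, if_neg hf, if_pos hcc, if_pos hcc]
      · rw [if_neg hcc]
        split_ifs <;> rfl

theorem pvMain (cs : List Char) (i : Nat) : pvLoopA cs i = pvLoopB cs i := by
  suffices h : ∀ n i, cs.length - i ≤ n → pvLoopA cs i = pvLoopB cs i from h cs.length i (by omega)
  intro n
  induction n with
  | zero =>
    intro i hn
    rw [pvLoopA_ge cs i (by omega), pvLoopB_ge cs i (by omega)]
  | succ n ih =>
    intro i hn
    by_cases hi : i < cs.length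
    · by_cases hpct : cs[i] = '%'
      · by_cases hpp : cs[i+1]? = some '%'
        · -- '%%'
          have hmA : pvMatchAt cs i = some (.pp i (i + 2)) := by
            unfold pvMatchAt
            rw [List.getElem?_eq_getElem hi, hpct, if_pos rfl, if_pos hpp]
          have hfind : pvFindFrom cs i = some (.pp i (i + 2)) := by
            rw [pvFindFrom_unfold cs i hi, hmA]
          rw [pvLoopA, pvLoopAGo, dif_pos hi, pvLoopAGo_len cs (i + 1) (by omega),
            pvLoopAGo_len cs (i + 2) (by omega)]
          simp only [hpct, if_true]
          try rw [if_neg (by decide : ¬('%' = '{')), if_neg (by decide : ¬('%' = '}'))]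
          rw [if_pos hpp]
          rw [pvLoopB, pvLoopBGo]
          split
          · rename_i m hm
            rw [hfind] at hm
            cases hm
            simp only [PvMatch.start, PvMatch.stop, pvConv, Nat.sub_self, List.take_zero, pvLit_nil,
              List.nil_append]
            rw [pvLoopBGo_len cs (i + 2) (by omega), ih (i + 2) (by omega)]
            rfl
          · rename_i hm; rw [hfind] at hm; cases hm
        · by_cases h4 : pvJ4 cs i < cs.length
          · -- complete specifier
            have hmA := pvMatchAt_eq_spec cs i hi hpct hpp h4
            have hfind : pvFindFrom cs i = some (.spec i (pvJ4 cs i + 1)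
                ((cs.drop i).take (pvJ4 cs i + 1 - i)) (pvWidth cs i) (pvPrecB cs i)
                cs[pvJ4 cs i]) := by
              rw [pvFindFrom_unfold cs i hi, hmA]
            rw [pvLoopA_eq_spec cs i hi hpct hpp h4]
            rw [pvLoopB, pvLoopBGo]
            split
            · rename_i m hm
              rw [hfind] at hm
              cases hm
              simp only [PvMatch.start, PvMatch.stop, Nat.sub_self, List.take_zero, pvLit_nil,
                List.nil_append]
              rw [pvLoopBGo_len cs (pvJ4 cs i + 1) (by omega),
                ih (pvJ4 cs i + 1) (by have := pvJ_chain cs i; omega), pvPiece_eq_conv cs i h4]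
            · rename_i hm; rw [hfind] at hm; cases hm
          · -- incomplete specifier at the end of the string
            have hmA : pvMatchAt cs i = none :=
              pvMatchAt_eq_incomplete cs i (by rw [List.getElem?_eq_getElem hi, hpct]) hpp h4
            have hfind : pvFindFrom cs i = none := by
              rw [pvFindFrom_step cs i hi hmA]
              exact pvFindFrom_none cs (i + 1) (pvNoPct cs i h4)
            rw [pvLoopA_eq_incomplete cs i hi hpct hpp h4]
            rw [pvLoopB, pvLoopBGo]
            split
            · rename_i m hm; rw [hfind] at hm; cases hm
            · have hcons : cs.drop i = cs[i] :: cs.drop (i + 1) := (List.getElem_cons_drop hi).symm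
              rw [hcons]
              have hd : List.findIdx? (fun x => decide (x = '%')) (cs[i] :: cs.drop (i + 1)) = some 0 := by
                rw [List.findIdx?_cons]; simp [hpct]
              simp only [hd, List.take_zero, pvLit_nil, List.nil_append, List.drop_zero]
      · -- ordinary literal character (including '{' / '}')
        rw [pvLoopB_literal cs i hi hpct, ← ih (i + 1) (by omega)]
        rw [pvLoopA, pvLoopAGo, dif_pos hi, pvLoopAGo_len cs (i + 1) (by omega)]
        by_cases h1 : cs[i] = '{'
        · simp only [h1, if_true]
          simp [pvEsc]
        · by_cases h2 : cs[i] = '}'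
          · simp only [h2, if_true]
            simp [pvEsc]
          · simp only []
            rw [if_neg h1, if_neg h2, if_neg hpct]
            simp [pvEsc, h1, h2]
    · rw [pvLoopA_ge cs i (by omega), pvLoopB_ge cs i (by omega)]

-- ===== VERDICT (by name: the statement is the Claim_ definition above) =====
theorem convert_printf_to_stdformat_spec : Claim_equal_convert_printf_to_stdformat := by
  intro fmt _
  unfold Spec_convert_printf_to_stdformat convert_printf_to_stdformat convert_printf_to_stdformat_alt
  rw [pvMain]
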